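-- pv_equiv track=rewrite | github.com/manas-17045/LeetcodeSolutions | Leetcode 2001-2100/2086/2086-2.py | minimumBuckets
-- ===== SOURCE A (Python) =====
-- def minimumBuckets(hamsters: str) -> int:
--     """
--     Calculates the minimum number of buckets needed to feed all hamsters.
--     :param hamsters: A string representing the hamsters' arrangement, where 'H' is a hamster and '.' is an empty space.
--     :return: The minimum number of buckets required, or -1 if it's impossible to feed all hamsters.
--     """
--     s = list(hamsters)
--     buckets = 0
--
--     for i in range(len(s)):
--         if s[i] == 'H':
--             # Check if hamster is already fed by adjacent bucket
--             if (i - 1 >= 0 and s[i - 1] == 'B') or (i + 1 < len(s) and s[i + 1] == 'B'):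
--                 continue
--
--             # Try to place bucket at i + 1 first (greedy approach)
--             if i + 1 < len(s) and s[i + 1] == '.':
--                 s[i + 1] = 'B'
--                 buckets += 1
--             # Otherwise, try i - 1
--             elif i - 1 >= 0 and s[i - 1] == '.':
--                 s[i - 1] = 'B'
--                 buckets += 1
--             # Can't feed this hamster
--             else:
--                 return -1
--
--     return buckets
-- ===== SOURCE B (Python) =====
-- def minimumBuckets(hamsters: str) -> int:
--     """One-pass finite-state machine with no lookahead and no mutation.
--     state 0: no hungry hamster pending; 'prev' is the previous character
--              (the character a just-placed bucket occupies counts as 'B').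
--     state 1: the previous char was a hamster with no usable left spot.
--     state 2: the previous char was a hamster whose left neighbour is '.'.
--     Each char is read exactly once; decisions about a hamster are made
--     retroactively when the next character arrives (or at end of string)."""
--     buckets = 0
--     state = 0
--     prev = 'x'
--     for c in hamsters:
--         if state == 0:
--             if c == 'H':
--                 if prev == 'B':
--                     prev = 'H'          # fed by bucket on its left
--                 else:
--                     state = 2 if prev == '.' else 1
--             else:
--                 prev = c
--         else:
--             if c == 'B':
--                 state = 0
--                 prev = 'B'              # pending hamster fed on its right
--             elif c == '.':
--                 buckets += 1            # place bucket here (right of hamster)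
--                 state = 0
--                 prev = 'B'
--             elif c == 'H':
--                 if state == 2:
--                     buckets += 1        # feed pending hamster from its left
--                     state = 1           # this new hamster has 'H' on its left
--                 else:
--                     return -1
--             else:
--                 if state == 2:
--                     buckets += 1
--                     state = 0
--                     prev = c
--                 else:
--                     return -1
--     if state == 1:
--         return -1
--     if state == 2:
--         buckets += 1
--     return buckets
-- ===== Notes on version B (the rewrite author's own statement) =====
-- stated objective: alternative
-- what changed: Replaces the mutable marker-array lookahead greedy (copy the string to a list, write 'B' markers, inspect both neighbours of each hamster) with a one-pass Mealy machine that reads each character exactly once, keeps only (state, prev, buckets), and decides each hamster's bucket retroactively when the following character arrives.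
import Mathlib
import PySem

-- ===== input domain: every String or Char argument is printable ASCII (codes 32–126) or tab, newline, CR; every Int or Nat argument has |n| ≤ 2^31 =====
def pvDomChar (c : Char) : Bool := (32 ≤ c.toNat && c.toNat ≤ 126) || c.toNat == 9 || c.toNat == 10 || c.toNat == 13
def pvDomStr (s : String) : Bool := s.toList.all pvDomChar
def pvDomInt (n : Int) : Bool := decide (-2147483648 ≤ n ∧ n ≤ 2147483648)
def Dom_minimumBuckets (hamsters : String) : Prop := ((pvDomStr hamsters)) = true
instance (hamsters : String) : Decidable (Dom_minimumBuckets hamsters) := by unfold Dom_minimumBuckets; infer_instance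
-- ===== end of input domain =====

-- B replaces A's mutable marker-array lookahead greedy with a one-pass Mealy machine
-- (state, prev, buckets) that reads each char once and decides retroactively — objective: alternative.


-- ===== PORT A =====
-- A's loop: index i over range(len(s)), with the char list s mutated in place ('B' markers).
def goA (s : List Char) (n i : Nat) (buckets : Int) : Int :=
  if _h : i < n then
    if s.getD i ' ' = 'H' then
      if (1 ≤ i ∧ s.getD (i - 1) ' ' = 'B') ∨ (i + 1 < n ∧ s.getD (i + 1) ' ' = 'B') then
        goA s n (i + 1) buckets
      else if i + 1 < n ∧ s.getD (i + 1) ' ' = '.' then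
        goA (s.set (i + 1) 'B') n (i + 1) (buckets + 1)
      else if 1 ≤ i ∧ s.getD (i - 1) ' ' = '.' then
        goA (s.set (i - 1) 'B') n (i + 1) (buckets + 1)
      else -1
    else goA s n (i + 1) buckets
  else buckets
termination_by n - i

def minimumBuckets (hamsters : String) : Int :=
  goA hamsters.toList hamsters.toList.length 0 0

-- ===== PORT B =====
-- B's for-loop over the characters: a Mealy machine with state ∈ {0,1,2},
-- the previous character 'prev', and the bucket count; no lookahead, no mutation.
def goM (state : Nat) (prev : Char) (buckets : Int) (l : List Char) : Int :=
  match l with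
  | [] => if state = 1 then -1 else if state = 2 then buckets + 1 else buckets
  | c :: rest =>
    if state = 0 then
      if c = 'H' then
        if prev = 'B' then goM 0 'H' buckets rest
        else goM (if prev = '.' then 2 else 1) prev buckets rest
      else goM 0 c buckets rest
    else
      if c = 'B' then goM 0 'B' buckets rest
      else if c = '.' then goM 0 'B' (buckets + 1) rest
      else if c = 'H' then
        if state = 2 then goM 1 prev (buckets + 1) rest
        else -1
      else
        if state = 2 then goM 0 c (buckets + 1) rest
        else -1

def minimumBuckets_alt (hamsters : String) : Int :=
  goM 0 'x' 0 hamsters.toList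

-- ===== PRECONDITION & SPEC =====
def Spec_minimumBuckets (hamsters : String) (out : Int) : Prop := out = minimumBuckets_alt hamsters
instance (hamsters : String) (out : Int) : Decidable (Spec_minimumBuckets hamsters out) := by unfold Spec_minimumBuckets; infer_instance

-- ===== CLAIM (what is proved, stated in full; the proofs are below) =====
def Claim_equal_minimumBuckets : Prop := ∀ (hamsters : String), Dom_minimumBuckets hamsters → Spec_minimumBuckets hamsters (minimumBuckets hamsters)

-- ===== LEMMAS AND PROOFS =====

-- Proof-only intermediate: the pointer form of the greedy (A without the marker array:
-- jump i+3 after a right placement).  goA = goP = goM.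
def goP (s : List Char) (n i : Nat) (buckets : Int) : Int :=
  if _h : i < n then
    if s.getD i ' ' = 'H' then
      if (1 ≤ i ∧ s.getD (i - 1) ' ' = 'B') ∨ (i + 1 < n ∧ s.getD (i + 1) ' ' = 'B') then
        goP s n (i + 1) buckets
      else if i + 1 < n ∧ s.getD (i + 1) ' ' = '.' then
        goP s n (i + 3) (buckets + 1)
      else if 1 ≤ i ∧ s.getD (i - 1) ' ' = '.' then
        goP s n (i + 1) (buckets + 1)
      else -1
    else goP s n (i + 1) buckets
  else buckets
termination_by n - i

-- Core simulation 1: if sA (A's possibly-mutated list) agrees with the original s on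
-- every position ≥ i-1, then A's loop from i computes the same answer as the pointer loop.
theorem goA_eq_goP (k : Nat) : ∀ (s sA : List Char) (n i : Nat) (b : Int),
    n = s.length → sA.length = s.length →
    (∀ j, i ≤ j + 1 → sA.getD j ' ' = s.getD j ' ') →
    n - i ≤ k → goA sA n i b = goP s n i b := by
  induction k with
  | zero =>
    intro s sA n i b hn hlen hagree hk
    have hni : ¬ i < n := by omega
    rw [goA, goP]
    simp [hni]
  | succ k ih =>
    intro s sA n i b hn hlen hagree hk
    by_cases hni : i < n
    · have hsi : sA.getD i ' ' = s.getD i ' ' := hagree i (by omega)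
      rw [goA, goP, dif_pos hni, dif_pos hni, hsi]
      by_cases hH : s.getD i ' ' = 'H'
      · rw [if_pos hH, if_pos hH]
        have hL : (1 ≤ i → sA.getD (i - 1) ' ' = s.getD (i - 1) ' ') := by
          intro h1; exact hagree (i - 1) (by omega)
        have hR : sA.getD (i + 1) ' ' = s.getD (i + 1) ' ' := hagree (i + 1) (by omega)
        by_cases hfed : (1 ≤ i ∧ s.getD (i - 1) ' ' = 'B') ∨ (i + 1 < n ∧ s.getD (i + 1) ' ' = 'B')
        · have hfedA : (1 ≤ i ∧ sA.getD (i - 1) ' ' = 'B') ∨ (i + 1 < n ∧ sA.getD (i + 1) ' ' = 'B') := by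
            rcases hfed with ⟨h1, h2⟩ | ⟨h1, h2⟩
            · exact Or.inl ⟨h1, by rw [hL h1]; exact h2⟩
            · exact Or.inr ⟨h1, by rw [hR]; exact h2⟩
          rw [if_pos hfedA, if_pos hfed]
          exact ih s sA n (i + 1) b hn hlen (fun j hj => hagree j (by omega)) (by omega)
        · have hfedA : ¬ ((1 ≤ i ∧ sA.getD (i - 1) ' ' = 'B') ∨ (i + 1 < n ∧ sA.getD (i + 1) ' ' = 'B')) := by
            intro hc; apply hfed
            rcases hc with ⟨h1, h2⟩ | ⟨h1, h2⟩
            · exact Or.inl ⟨h1, by rw [← hL h1]; exact h2⟩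
            · exact Or.inr ⟨h1, by rw [← hR]; exact h2⟩
          rw [if_neg hfedA, if_neg hfed]
          by_cases hright : i + 1 < n ∧ s.getD (i + 1) ' ' = '.'
          · have hrightA : i + 1 < n ∧ sA.getD (i + 1) ' ' = '.' := ⟨hright.1, by rw [hR]; exact hright.2⟩
            rw [if_pos hrightA, if_pos hright]
            -- A places at i+1, then walks i+1 (the 'B', not 'H') and i+2 (fed or non-'H'): reaches i+3.
            set sA' : List Char := sA.set (i + 1) 'B' with hsA'
            have hlen' : sA'.length = s.length := by simp [hsA', hlen]
            have hin1 : i + 1 < sA.length := by omega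
            have hB : sA'.getD (i + 1) ' ' = 'B' := by
              simp [hsA', List.getD_eq_getElem?_getD, hin1]
            have hkeep : ∀ j, j ≠ i + 1 → sA'.getD j ' ' = sA.getD j ' ' := by
              intro j hj
              simp [hsA', List.getD_eq_getElem?_getD, List.getElem?_set_ne (Ne.symm hj)]
            have hstep1 : goA sA' n (i + 1) (b + 1) = goA sA' n (i + 2) (b + 1) := by
              have hne : sA'.getD (i + 1) ' ' ≠ 'H' := by rw [hB]; decide
              rw [goA, dif_pos hright.1, if_neg hne]
            have hstep2 : goA sA' n (i + 2) (b + 1) = goP s n (i + 3) (b + 1) := by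
              by_cases h2 : i + 2 < n
              · have hrec : goA sA' n (i + 3) (b + 1) = goP s n (i + 3) (b + 1) := by
                  apply ih s sA' n (i + 3) (b + 1) hn hlen'
                  · intro j hj
                    rw [hkeep j (by omega)]
                    exact hagree j (by omega)
                  · omega
                rw [goA, dif_pos h2]
                by_cases hH2 : sA'.getD (i + 2) ' ' = 'H'
                · rw [if_pos hH2,
                      if_pos (Or.inl ⟨by omega, by simpa using hB⟩)]
                  exact hrec
                · rw [if_neg hH2]; exact hrec
              · rw [goA, goP, dif_neg h2, dif_neg (show ¬ i + 3 < n by omega)]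
            rw [hstep1, hstep2]
          · have hrightA : ¬ (i + 1 < n ∧ sA.getD (i + 1) ' ' = '.') := by
              intro hc; exact hright ⟨hc.1, by rw [← hR]; exact hc.2⟩
            rw [if_neg hrightA, if_neg hright]
            by_cases hleft : 1 ≤ i ∧ s.getD (i - 1) ' ' = '.'
            · have hleftA : 1 ≤ i ∧ sA.getD (i - 1) ' ' = '.' :=
                ⟨hleft.1, by rw [hL hleft.1]; exact hleft.2⟩
              rw [if_pos hleftA, if_pos hleft]
              apply ih s (sA.set (i - 1) 'B') n (i + 1) (b + 1) hn (by simp [hlen])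
              · intro j hj
                have hjne : j ≠ i - 1 := by omega
                rw [List.getD_eq_getElem?_getD, List.getElem?_set_ne (Ne.symm hjne),
                    ← List.getD_eq_getElem?_getD]
                exact hagree j (by omega)
              · omega
            · have hleftA : ¬ (1 ≤ i ∧ sA.getD (i - 1) ' ' = '.') := by
                intro hc; exact hleft ⟨hc.1, by rw [← hL hc.1]; exact hc.2⟩
              rw [if_neg hleftA, if_neg hleft]
      · rw [if_neg hH, if_neg hH]
        exact ih s sA n (i + 1) b hn hlen (fun j hj => hagree j (by omega)) (by omega)
    · rw [goA, goP, dif_neg hni, dif_neg hni]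

-- 'prev' faithfully describes position i-1 as far as the machine reads it.
def prevOK (s : List Char) (i : Nat) (prev : Char) : Prop :=
  (prev = 'B' ↔ 1 ≤ i ∧ s.getD (i - 1) ' ' = 'B') ∧
  (prev = '.' ↔ 1 ≤ i ∧ s.getD (i - 1) ' ' = '.')

-- Core simulation 2: the pointer loop equals the Mealy machine.
-- Part 1 (state 0): no pending hamster.  Part 2 (states 1/2): the char at i-1 was an
-- unfed hamster; ld records whether its left neighbour is usable.
theorem goP_eq_goM (k : Nat) : ∀ (s : List Char) (n i : Nat) (b : Int),
    n = s.length → n - i ≤ k →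
    ((∀ prev, prevOK s i prev → goP s n i b = goM 0 prev b (s.drop i)) ∧
     (i < n → s.getD i ' ' = 'H' → ¬ (1 ≤ i ∧ s.getD (i - 1) ' ' = 'B') →
       ∀ (ld : Bool) prev, (ld = true ↔ 1 ≤ i ∧ s.getD (i - 1) ' ' = '.') →
         goP s n i b = goM (if ld then 2 else 1) prev b (s.drop (i + 1)))) := by
  induction k with
  | zero =>
    intro s n i b hn hk
    constructor
    · intro prev _
      have hni : ¬ i < n := by omega
      rw [goP, dif_neg hni, List.drop_eq_nil_of_le (by omega), goM]
      simp
    · intro hni; omega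
  | succ k ih =>
    intro s n i b hn hk
    have hdrop : ∀ j, j < s.length → s.drop j = s.getD j ' ' :: s.drop (j + 1) := by
      intro j hj
      rw [List.drop_eq_getElem_cons hj, List.getD_eq_getElem _ _ hj]
    have hprevself : ∀ j (c : Char), s.getD j ' ' = c → prevOK s (j + 1) c := by
      intro j c hc
      exact ⟨by simp [← hc], by simp [← hc]⟩
    -- helper: after a bucket has been placed at position i+1, the machine in state 0 with
    -- prev = 'B' starting at i+2 computes the same as the pointer loop restarted at i+3.
    have hstepB : ∀ (i' : Nat) (b' : Int), n - i' ≤ k + 1 → i' < n →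
        goM 0 'B' b' (s.drop (i' + 2)) = goP s n (i' + 3) b' := by
      intro i' b' hk' hi'
      by_cases h2 : i' + 2 < n
      · rw [hdrop (i' + 2) (by omega)]
        set e := s.getD (i' + 2) ' ' with he
        have hM : goM 0 'B' b' (e :: s.drop (i' + 3)) = goM 0 e b' (s.drop (i' + 3)) := by
          by_cases hee : e = 'H'
          · rw [goM]; simp [hee]
          · rw [goM]; simp [hee]
        rw [hM]
        exact ((ih s n (i' + 3) b' hn (by omega)).1 e (hprevself (i' + 2) e rfl)).symm
      · rw [List.drop_eq_nil_of_le (by omega), goP, dif_neg (show ¬ i' + 3 < n by omega), goM]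
        simp
    have h2 : i < n → s.getD i ' ' = 'H' → ¬ (1 ≤ i ∧ s.getD (i - 1) ' ' = 'B') →
        ∀ (ld : Bool) prev, (ld = true ↔ 1 ≤ i ∧ s.getD (i - 1) ' ' = '.') →
          goP s n i b = goM (if ld then 2 else 1) prev b (s.drop (i + 1)) := by
      intro hni hH hnotB ld prev hld
      rw [goP, dif_pos hni, if_pos hH]
      by_cases h1n : i + 1 < n
      · rw [hdrop (i + 1) (by omega)]
        set d := s.getD (i + 1) ' ' with hd
        by_cases hdB : d = 'B'
        · -- fed from the right
          rw [if_pos (Or.inr ⟨h1n, hdB⟩)]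
          have hM : goM (if ld then 2 else 1) prev b (d :: s.drop (i + 2))
              = goM 0 'B' b (s.drop (i + 2)) := by
            rw [goM]; cases ld <;> simp [hdB]
          rw [hM]
          have hstep : goP s n (i + 1) b = goP s n (i + 2) b := by
            rw [goP, dif_pos h1n, if_neg (by rw [← hd, hdB]; decide)]
          rw [hstep]
          exact (ih s n (i + 2) b hn (by omega)).1 'B'
            (hprevself (i + 1) 'B' (by rw [← hd]; exact hdB))
        · rw [if_neg (by rintro (h | h); exact hnotB h; exact hdB h.2)]
          by_cases hdD : d = '.'
          · -- place to the right
            rw [if_pos ⟨h1n, hdD⟩]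
            have hM : goM (if ld then 2 else 1) prev b (d :: s.drop (i + 2))
                = goM 0 'B' (b + 1) (s.drop (i + 2)) := by
              rw [goM]; cases ld <;> simp [hdD]
            rw [hM, hstepB i (b + 1) hk hni]
          · rw [if_neg (by rintro ⟨_, h⟩; exact hdD h)]
            by_cases hdH : d = 'H'
            · -- next char is another hamster
              cases ld with
              | true =>
                rw [if_pos ⟨hld.mp rfl |>.1, (hld.mp rfl).2⟩]
                have hM : goM (if true then 2 else 1) prev b (d :: s.drop (i + 2))
                    = goM 1 prev (b + 1) (s.drop (i + 2)) := by
                  rw [goM]; simp [hdH]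
                rw [hM]
                exact (ih s n (i + 1) (b + 1) hn (by omega)).2 h1n (by rw [← hd]; exact hdH)
                  (by rw [show i + 1 - 1 = i from rfl]; rintro ⟨_, h⟩; rw [hH] at h; exact absurd h (by decide))
                  false prev
                  (by rw [show i + 1 - 1 = i from rfl]; constructor
                      · intro h; exact absurd h (by decide)
                      · rintro ⟨_, h⟩; rw [hH] at h; exact absurd h (by decide))
              | false =>
                rw [if_neg (by rintro ⟨h1, h2⟩; exact absurd (hld.mpr ⟨h1, h2⟩) (by decide))]
                rw [goM]; simp [hdH]
            · -- next char is a blocker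
              cases ld with
              | true =>
                rw [if_pos ⟨hld.mp rfl |>.1, (hld.mp rfl).2⟩]
                have hM : goM (if true then 2 else 1) prev b (d :: s.drop (i + 2))
                    = goM 0 d (b + 1) (s.drop (i + 2)) := by
                  rw [goM]; simp [hdH, hdB, hdD]
                rw [hM]
                have hstep : goP s n (i + 1) (b + 1) = goP s n (i + 2) (b + 1) := by
                  rw [goP, dif_pos h1n, if_neg (by rw [← hd]; exact hdH)]
                rw [hstep]
                exact (ih s n (i + 2) (b + 1) hn (by omega)).1 d (hprevself (i + 1) d rfl)
              | false =>
                rw [if_neg (by rintro ⟨h1, h2⟩; exact absurd (hld.mpr ⟨h1, h2⟩) (by decide))]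
                rw [goM]; simp [hdH, hdB, hdD]
      · -- i is the last index: no right neighbour
        have hnil : s.drop (i + 1) = [] := List.drop_eq_nil_of_le (by omega)
        rw [hnil]
        rw [if_neg (by rintro (h | h); exact hnotB h; exact absurd h.1 h1n)]
        rw [if_neg (by rintro ⟨h, _⟩; exact h1n h)]
        cases ld with
        | true =>
          rw [if_pos ⟨hld.mp rfl |>.1, (hld.mp rfl).2⟩]
          rw [goP, dif_neg (show ¬ i + 1 < n from h1n), goM]
          simp
        | false =>
          rw [if_neg (by rintro ⟨h1, h2⟩; exact absurd (hld.mpr ⟨h1, h2⟩) (by decide))]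
          rw [goM]; simp
    refine ⟨?_, h2⟩
    intro prev hpOK
    by_cases hni : i < n
    · rw [hdrop i (by omega)]
      set c := s.getD i ' ' with hc
      by_cases hcH : c = 'H'
      · by_cases hpB : prev = 'B'
        · -- fed from the left
          have hM : goM 0 prev b (c :: s.drop (i + 1)) = goM 0 'H' b (s.drop (i + 1)) := by
            rw [goM]; simp [hcH, hpB]
          rw [hM, goP, dif_pos hni, if_pos (by rw [← hc]; exact hcH),
              if_pos (Or.inl (hpOK.1.mp hpB))]
          exact (ih s n (i + 1) b hn (by omega)).1 'H'
            (hprevself i 'H' (by rw [← hc]; exact hcH))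
        · have hM : goM 0 prev b (c :: s.drop (i + 1))
              = goM (if prev = '.' then 2 else 1) prev b (s.drop (i + 1)) := by
            rw [goM]; simp [hcH, hpB]
          rw [hM]
          have hnotB : ¬ (1 ≤ i ∧ s.getD (i - 1) ' ' = 'B') := fun h => hpB (hpOK.1.mpr h)
          by_cases hpD : prev = '.'
          · rw [if_pos hpD]
            exact h2 hni hcH hnotB true prev
              ⟨fun _ => hpOK.2.mp hpD, fun _ => rfl⟩
          · rw [if_neg hpD]
            exact h2 hni hcH hnotB false prev
              (by constructor
                  · intro h; exact absurd h (by decide)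
                  · intro h; exact absurd (hpOK.2.mpr h) hpD)
      · have hM : goM 0 prev b (c :: s.drop (i + 1)) = goM 0 c b (s.drop (i + 1)) := by
          rw [goM]; simp [hcH]
        rw [hM, goP, dif_pos hni, if_neg (by rw [← hc]; exact hcH)]
        exact (ih s n (i + 1) b hn (by omega)).1 c (hprevself i c rfl)
    · rw [goP, dif_neg hni, List.drop_eq_nil_of_le (by omega), goM]
      simp

-- ===== VERDICT (by name: the statement is the Claim_ definition above) =====
theorem minimumBuckets_spec : Claim_equal_minimumBuckets := by
  intro hamsters _
  unfold Spec_minimumBuckets minimumBuckets minimumBuckets_alt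
  have h1 := goA_eq_goP hamsters.toList.length hamsters.toList hamsters.toList
    hamsters.toList.length 0 0 rfl rfl (fun _ _ => rfl) (by omega)
  have h2 := (goP_eq_goM hamsters.toList.length hamsters.toList
    hamsters.toList.length 0 0 rfl (by omega)).1 'x'
    ⟨by simp, by simp⟩
  rw [h1]
  simpa using h2
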